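-- pv_equiv track=rewrite | github.com/Luxusio/harness | plugin/mcp/harness_server.py | _result_summary_line
-- ===== SOURCE A (Python) =====
-- from typing import Any, Callable
--
-- def _result_summary_line(response: dict[str, Any]) -> str:
--     lines = []
--     for source in (response.get("stdout") or "", response.get("stderr") or ""):
--         for raw in str(source).splitlines():
--             line = raw.strip()
--             if line.startswith("RESULT:"):
--                 lines.append(line)
--     if lines:
--         return lines[-1]
--     evidence = []
--     for source in (response.get("stdout") or "", response.get("stderr") or ""):
--         for raw in str(source).splitlines():
--             line = raw.strip()
--             if line.startswith("[EVIDENCE]"):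
--                 evidence.append(line)
--     if evidence:
--         return evidence[-1]
--     tail = []
--     for source in (response.get("stdout") or "", response.get("stderr") or ""):
--         tail.extend([raw.strip() for raw in str(source).splitlines() if raw.strip()])
--     return tail[-1] if tail else ""
-- ===== SOURCE B (Python) =====
-- def _result_summary_line(response):
--     lines = []
--     for source in (response.get("stdout") or "", response.get("stderr") or ""):
--         lines.extend(raw.strip() for raw in str(source).splitlines())
--     last_result = last_evidence = last_nonempty = ""
--     for line in lines:
--         if line.startswith("RESULT:"):
--             last_result = line
--         if line.startswith("[EVIDENCE]"):
--             last_evidence = line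
--         if line:
--             last_nonempty = line
--     return last_result or last_evidence or last_nonempty
-- ===== Notes on version B (the rewrite author's own statement) =====
-- stated objective: simpler
-- what changed: Replaces A's three separate passes over the split lines (collect RESULT lines, then EVIDENCE lines, then non-empty lines, each taking the last) with a single pass that keeps three 'last seen' variables and returns them in priority order.
import Mathlib
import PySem

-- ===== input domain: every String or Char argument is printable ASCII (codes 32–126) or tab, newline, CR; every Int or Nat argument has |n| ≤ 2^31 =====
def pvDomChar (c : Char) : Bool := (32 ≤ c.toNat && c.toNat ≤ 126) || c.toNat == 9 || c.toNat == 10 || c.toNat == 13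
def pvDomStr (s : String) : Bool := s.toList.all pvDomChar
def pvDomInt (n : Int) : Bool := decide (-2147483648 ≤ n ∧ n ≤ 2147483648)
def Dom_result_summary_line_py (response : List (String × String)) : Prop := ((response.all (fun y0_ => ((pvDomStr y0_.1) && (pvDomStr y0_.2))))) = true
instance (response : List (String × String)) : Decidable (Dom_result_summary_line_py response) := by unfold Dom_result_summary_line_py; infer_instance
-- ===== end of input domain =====

-- B replaces A's three passes over the lines by one pass keeping three 'last seen' variables (simpler).

-- ===== PORT A =====
-- literal transliteration of A: three passes, each collecting matches and taking the last
def result_summary_line_py (response : List (String × String)) : String :=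
  let sources := [(((PySem.Dict.mk response).get? "stdout").getD ""), (((PySem.Dict.mk response).get? "stderr").getD "")]
  let lines := sources.foldl (fun acc source =>
    (PySem.Str.splitlines source).foldl (fun acc raw =>
      let line := PySem.Str.strip raw
      if PySem.Str.startswith line "RESULT:" then acc ++ [line] else acc) acc) []
  match lines.getLast? with
  | some l => l
  | none =>
    let evidence := sources.foldl (fun acc source =>
      (PySem.Str.splitlines source).foldl (fun acc raw =>
        let line := PySem.Str.strip raw
        if PySem.Str.startswith line "[EVIDENCE]" then acc ++ [line] else acc) acc) []
    match evidence.getLast? with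
    | some l => l
    | none =>
      let tail := sources.foldl (fun acc source =>
        acc ++ ((PySem.Str.splitlines source).map PySem.Str.strip).filter (fun l => l ≠ "")) []
      match tail.getLast? with
      | some l => l
      | none => ""

-- ===== PORT B =====
-- literal transliteration of B: flatten/strip once, one fold over a triple of 'last seen' values
def result_summary_line_py_alt (response : List (String × String)) : String :=
  let lines :=
    (PySem.Str.splitlines (((PySem.Dict.mk response).get? "stdout").getD "")).map PySem.Str.strip ++
    (PySem.Str.splitlines (((PySem.Dict.mk response).get? "stderr").getD "")).map PySem.Str.strip
  let st := lines.foldl (fun (st : String × String × String) line =>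
      (if PySem.Str.startswith line "RESULT:" then line else st.1,
       if PySem.Str.startswith line "[EVIDENCE]" then line else st.2.1,
       if line ≠ "" then line else st.2.2)) ("", "", "")
  if st.1 ≠ "" then st.1 else if st.2.1 ≠ "" then st.2.1 else st.2.2

-- ===== PRECONDITION & SPEC =====
def Spec_result_summary_line_py (response : List (String × String)) (out : String) : Prop := out = result_summary_line_py_alt response
instance (response : List (String × String)) (out : String) : Decidable (Spec_result_summary_line_py response out) := by unfold Spec_result_summary_line_py; infer_instance

-- ===== CLAIM (what is proved, stated in full; the proofs are below) =====
def Claim_equal_result_summary_line_py : Prop := ∀ (response : List (String × String)), Dom_result_summary_line_py response → Spec_result_summary_line_py response (result_summary_line_py response)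

-- ===== LEMMAS AND PROOFS =====

-- A's append-if pass over raw lines collects exactly the stripped lines satisfying p
theorem foldl_appendIf_eq_filter (pre : String) (L : List String) (acc : List String) :
    L.foldl (fun acc raw =>
      if PySem.Str.startswith (PySem.Str.strip raw) pre then acc ++ [PySem.Str.strip raw] else acc) acc
    = acc ++ (L.map PySem.Str.strip).filter (fun l => PySem.Str.startswith l pre) := by
  induction L generalizing acc with
  | nil => simp
  | cons x xs ih =>
    simp only [List.foldl_cons, List.map_cons, List.filter_cons]
    by_cases h : PySem.Str.startswith (PySem.Str.strip x) pre
    · simp only [if_pos h, ih, List.append_assoc, List.singleton_append]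
    · simp only [if_neg h, ih]

-- B's 'last seen' fold equals the last element of the filtered list (default if none)
theorem foldl_lastIf_eq_getLast (p : String → Bool) (L : List String) (a : String) :
    L.foldl (fun a x => if p x then x else a) a = ((L.filter p).getLast?).getD a := by
  induction L generalizing a with
  | nil => simp
  | cons x xs ih =>
    simp only [List.foldl_cons, List.filter_cons]
    by_cases h : p x
    · simp only [if_pos h]
      rw [ih, List.getLast?_cons, Option.getD_some]
    · simp only [if_neg h]
      exact ih a

-- B's 'last non-empty' fold, same statement for the propositional if
theorem foldl_lastNe_eq_getLast (L : List String) (a : String) :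
    L.foldl (fun a x => if x ≠ "" then x else a) a = ((L.filter (fun x => decide (x ≠ ""))).getLast?).getD a := by
  induction L generalizing a with
  | nil => simp
  | cons x xs ih =>
    simp only [List.foldl_cons, List.filter_cons]
    by_cases h : x = ""
    · simp only [h]
      simpa using ih a
    · simp only [if_pos h, decide_eq_true_eq, ne_eq, h, not_false_eq_true, if_true]
      rw [ih, List.getLast?_cons, Option.getD_some]

-- the triple fold splits into three independent folds
theorem foldl_triple (L : List String) (p q : String → Bool) (a b c : String) :
    L.foldl (fun (st : String × String × String) line =>
      (if p line then line else st.1,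
       if q line then line else st.2.1,
       if line ≠ "" then line else st.2.2)) (a, b, c)
    = (L.foldl (fun a x => if p x then x else a) a,
       L.foldl (fun a x => if q x then x else a) b,
       L.foldl (fun a x => if x ≠ "" then x else a) c) := by
  induction L generalizing a b c with
  | nil => rfl
  | cons x xs ih => simp only [List.foldl_cons]; exact ih _ _ _

theorem ne_empty_of_startswith (l pre : String) (h : PySem.Str.startswith l pre = true)
    (hpre : pre ≠ "") : l ≠ "" := by
  intro hl
  subst hl
  rw [PySem.Str.startswith_eq] at h
  have := (PySem.Chars.startswith_iff _ _).mp h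
  simp only [String.toList_empty, List.prefix_nil] at this
  apply hpre
  have h0 : pre.toList = ("" : String).toList := by simpa using this
  exact String.toList_inj.mp h0

theorem getLastD_mem_or (L : List String) (d : String) :
    L.getLast?.getD d ∈ L ∨ (L = [] ∧ L.getLast?.getD d = d) := by
  cases h : L.getLast? with
  | none => exact Or.inr ⟨List.getLast?_eq_none_iff.mp h, by simp [h]⟩
  | some l => exact Or.inl (by simpa [h] using List.mem_of_getLast? h)

-- ===== VERDICT (by name: the statement is the Claim_ definition above) =====
theorem result_summary_line_py_spec : Claim_equal_result_summary_line_py := by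
  intro response _
  unfold Spec_result_summary_line_py result_summary_line_py result_summary_line_py_alt
  simp only [List.foldl_cons, List.foldl_nil]
  set s1 := ((PySem.Dict.mk response).get? "stdout").getD "" with hs1
  set s2 := ((PySem.Dict.mk response).get? "stderr").getD "" with hs2
  set L : List String := (PySem.Str.splitlines s1).map PySem.Str.strip ++
                         (PySem.Str.splitlines s2).map PySem.Str.strip with hL
  rw [foldl_appendIf_eq_filter, foldl_appendIf_eq_filter,
      foldl_appendIf_eq_filter, foldl_appendIf_eq_filter, foldl_triple,
      foldl_lastIf_eq_getLast, foldl_lastIf_eq_getLast, foldl_lastNe_eq_getLast]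
  simp only [List.nil_append, ← List.filter_append, ← hL]
  -- now both sides are phrased over the filtered sublists of L
  rcases getLastD_mem_or (L.filter (fun l => PySem.Str.startswith l "RESULT:")) "" with hmem | ⟨hnil, hval⟩
  · have hsw := (List.mem_filter.mp hmem).2
    have hne : (L.filter (fun l => PySem.Str.startswith l "RESULT:")).getLast?.getD "" ≠ "" :=
      ne_empty_of_startswith _ _ hsw (by decide)
    rcases h : (L.filter (fun l => PySem.Str.startswith l "RESULT:")).getLast? with _ | l
    · rw [h] at hne; simp at hne
    · rw [h] at hne
      simp only [Option.getD_some] at hne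
      simp [hne]
  · rw [List.getLast?_eq_none_iff.mpr hnil]
    simp only [Option.getD_none, not_true_eq_false, if_false]
    rcases getLastD_mem_or (L.filter (fun l => PySem.Str.startswith l "[EVIDENCE]")) "" with hmem | ⟨hnil2, hval2⟩
    · have hsw := (List.mem_filter.mp hmem).2
      have hne : (L.filter (fun l => PySem.Str.startswith l "[EVIDENCE]")).getLast?.getD "" ≠ "" :=
        ne_empty_of_startswith _ _ hsw (by decide)
      rcases h : (L.filter (fun l => PySem.Str.startswith l "[EVIDENCE]")).getLast? with _ | l
      · rw [h] at hne; simp at hne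
      · rw [h] at hne
        simp only [Option.getD_some] at hne
        simp [hne]
    · rw [List.getLast?_eq_none_iff.mpr hnil2]
      simp only [Option.getD_none, not_true_eq_false, if_false]
      rcases h : (L.filter (fun l => decide (l ≠ ""))).getLast? with _ | l <;> simp
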